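-- pv_equiv track=rewrite | github.com/FalseHuman/yandex_parser_to_excel | yandex_parser.py | original_photo_size
-- ===== SOURCE A (Python) =====
-- def original_photo_size(link):
--     # Замена значений кропа на orig
--     if link != 'https://avatars.mds.yandex.net/get-yapic/0/0-0/islands-retina-50':
--         link = link.split('/')
--         link[-1] = link[-1].replace(link[-1], 'orig')
--         # Формирование новой ссылки
--         new_link = ''
--         for index_elem in link:
--             new_link += index_elem + '/'
--         return new_link
--     else:
--         return link
-- ===== SOURCE B (Python) =====
-- def original_photo_size(link):
--     # Rewrite the crop segment to orig by slicing at the last '/' (no list, no loop)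
--     if link == 'https://avatars.mds.yandex.net/get-yapic/0/0-0/islands-retina-50':
--         return link
--     return link[:link.rfind('/') + 1] + 'orig/'
-- ===== Notes on version B (the rewrite author's own statement) =====
-- stated objective: idiomatic
-- what changed: Instead of splitting the URL into a segment list, overwriting the last segment and re-joining it in an append loop, B locates the last separator with rfind and rebuilds the link by one slice plus the orig suffix.
import Mathlib
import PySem

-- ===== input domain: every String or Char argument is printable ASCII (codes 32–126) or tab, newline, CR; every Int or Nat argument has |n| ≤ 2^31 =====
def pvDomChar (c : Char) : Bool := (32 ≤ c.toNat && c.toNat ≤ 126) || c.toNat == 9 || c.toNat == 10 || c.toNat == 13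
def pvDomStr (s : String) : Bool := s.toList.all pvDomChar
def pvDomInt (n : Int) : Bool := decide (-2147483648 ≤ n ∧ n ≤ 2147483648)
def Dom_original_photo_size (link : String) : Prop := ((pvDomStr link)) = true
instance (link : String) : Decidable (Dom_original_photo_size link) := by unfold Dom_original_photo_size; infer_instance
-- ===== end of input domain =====

-- B replaces A's split / overwrite-last-segment / append-loop rebuild by a single
-- slice up to the last '/' (rfind) plus the literal "orig/" — more idiomatic, same value.


-- ===== PORT A =====
def original_photo_size (link : String) : String :=
  if link ≠ "https://avatars.mds.yandex.net/get-yapic/0/0-0/islands-retina-50" then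
    -- link = link.split('/')
    let parts := PySem.Chars.splitOn link.toList ['/']
    -- link[-1] = link[-1].replace(link[-1], 'orig')   (split never yields [], so the default is unreachable)
    let last := PySem.List.pyGetD parts (-1) []
    let parts := parts.dropLast ++ [PySem.Chars.replace last last "orig".toList]
    -- new_link = ''; for index_elem in link: new_link += index_elem + '/'
    let newLink := parts.foldl (fun acc e => acc ++ e ++ ['/']) []
    String.ofList newLink
  else
    link

-- ===== PORT B =====
def original_photo_size_alt (link : String) : String :=
  if link == "https://avatars.mds.yandex.net/get-yapic/0/0-0/islands-retina-50" then
    link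
  else
    -- link[:link.rfind('/') + 1] + 'orig/'
    let cs := link.toList
    String.ofList (PySem.Chars.slice cs none (some (PySem.Chars.rfind cs ['/'] + 1)) ++ "orig/".toList)

-- ===== PRECONDITION & SPEC =====
def Spec_original_photo_size (link : String) (out : String) : Prop := out = original_photo_size_alt link
instance (link : String) (out : String) : Decidable (Spec_original_photo_size link out) := by unfold Spec_original_photo_size; infer_instance

-- ===== CLAIM (what is proved, stated in full; the proofs are below) =====
def Claim_equal_original_photo_size : Prop := ∀ (link : String), Dom_original_photo_size link → Spec_original_photo_size link (original_photo_size link)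

-- ===== LEMMAS AND PROOFS =====

lemma cons_headI_tail {α} [Inhabited α] (l : List α) (h : l ≠ []) : l.headI :: l.tail = l := by
  cases l with
  | nil => exact absurd rfl h
  | cons a t => rfl

-- structural-recursion description of splitting on a single '/'
def spl : List Char → List (List Char)
  | [] => [[]]
  | c :: rest =>
    if c = '/' then [] :: spl rest
    else match spl rest with
      | p :: ps => (c :: p) :: ps
      | [] => [[c]]

lemma spl_ne_nil (cs : List Char) : spl cs ≠ [] := by
  cases cs with
  | nil => simp [spl]
  | cons c rest =>
    simp only [spl]
    split_ifs with h
    · simp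
    · cases hs : spl rest <;> simp

lemma prefOf (c : Char) (r : List Char) : ['/'].isPrefixOf (c::r) = (c == '/') := by
  simp [List.isPrefixOf, eq_comm]

lemma sgo_spec (fuel : Nat) (l cur : List Char) (acc : List (List Char))
    (h : l.length < fuel) :
    PySem.Chars.splitOn.go ['/'] fuel l cur acc =
      acc.reverse ++ (cur.reverse ++ (spl l).headI) :: (spl l).tail := by
  induction fuel generalizing l cur acc with
  | zero => omega
  | succ n ih =>
    cases l with
    | nil => simp [PySem.Chars.splitOn.go, spl]
    | cons c rest =>
      simp only [PySem.Chars.splitOn.go, prefOf]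
      by_cases hc : c = '/'
      · rw [if_pos (by simp [hc])]
        rw [ih _ _ _ (by simp at h ⊢; omega)]
        simp [spl, hc, cons_headI_tail _ (spl_ne_nil rest)]
      · rw [if_neg (by simp [hc])]
        rw [ih _ _ _ (by simp at h ⊢; omega)]
        have := spl_ne_nil rest
        cases hs : spl rest with
        | nil => exact absurd hs this
        | cons p ps => simp [spl, hc, hs]

lemma splitOn_eq_spl (cs : List Char) : PySem.Chars.splitOn cs ['/'] = spl cs := by
  have := sgo_spec (cs.length + 1) cs [] [] (by omega)
  simpa [PySem.Chars.splitOn, cons_headI_tail _ (spl_ne_nil cs)] using this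

lemma rgo_nil (old new : List Char) (fuel : Nat) (acc : List Char) :
    PySem.Chars.replace.go old new fuel [] acc = acc.reverse := by
  cases fuel <;> simp [PySem.Chars.replace.go]

lemma replace_self (s t : List Char) : PySem.Chars.replace s s t = t := by
  cases s with
  | nil => simp [PySem.Chars.replace]
  | cons c cs =>
    have h : (c :: cs).isPrefixOf (c :: cs) = true := by
      simp [List.isPrefixOf_iff_prefix]
    simp [PySem.Chars.replace, PySem.Chars.replace.go, h, rgo_nil]

lemma rfgo_succ (s : List Char) (j : Nat) :
    PySem.Chars.rfind.go s ['/'] (j+1) =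
      if ['/'].isPrefixOf (s.drop (j+1)) then ((j+1 : Nat) : Int) else PySem.Chars.rfind.go s ['/'] j := by
  simp [PySem.Chars.rfind.go]

lemma rfgo_zero (s : List Char) :
    PySem.Chars.rfind.go s ['/'] 0 = if ['/'].isPrefixOf s then 0 else -1 := by
  simp [PySem.Chars.rfind.go]

lemma rfgo_shift (c : Char) (rest : List Char) (j : Nat) :
    PySem.Chars.rfind.go (c :: rest) ['/'] (j+1) =
      if PySem.Chars.rfind.go rest ['/'] j = -1 then (if c = '/' then 0 else -1)
      else PySem.Chars.rfind.go rest ['/'] j + 1 := by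
  induction j with
  | zero =>
    rw [rfgo_succ, rfgo_zero, rfgo_zero]
    simp only [List.drop_succ_cons, List.drop_zero, prefOf]
    split_ifs <;> simp_all
  | succ n ih =>
    rw [rfgo_succ, rfgo_succ rest n, ih]
    simp only [List.drop_succ_cons]
    have hge : ∀ k : Nat, PySem.Chars.rfind.go rest ['/'] k ≥ -1 := by
      intro k; induction k with
      | zero => rw [rfgo_zero]; split_ifs <;> omega
      | succ m ihm => rw [rfgo_succ]; split_ifs with h; · push_cast; omega
                      · exact ihm
    split_ifs <;> first | rfl | omega | (push_cast; omega) | simp_all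

lemma rfgo_ge (s : List Char) (k : Nat) : -1 ≤ PySem.Chars.rfind.go s ['/'] k := by
  induction k with
  | zero => rw [rfgo_zero]; split_ifs <;> omega
  | succ m ihm => rw [rfgo_succ]; split_ifs with h; · push_cast; omega
                  · exact ihm

lemma rfind_ge (cs : List Char) : -1 ≤ PySem.Chars.rfind cs ['/'] := rfgo_ge cs cs.length

lemma rfind_nil : PySem.Chars.rfind [] ['/'] = -1 := by decide

lemma rfind_cons (c : Char) (rest : List Char) :
    PySem.Chars.rfind (c :: rest) ['/'] =
      if PySem.Chars.rfind rest ['/'] = -1 then (if c = '/' then 0 else -1)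
      else PySem.Chars.rfind rest ['/'] + 1 := by
  have := rfgo_shift c rest rest.length
  simpa [PySem.Chars.rfind] using this

lemma spl_cons (c : Char) (rest : List Char) :
    spl (c :: rest) = if c = '/' then [] :: spl rest
      else (c :: (spl rest).headI) :: (spl rest).tail := by
  simp only [spl]
  split_ifs with hc
  · rfl
  · cases hs : spl rest with
    | nil => exact absurd hs (spl_ne_nil rest)
    | cons p ps => rfl

-- the crux: dropping the last '/'-segment keeps exactly the prefix up to and including the last '/'
lemma key (cs : List Char) :
    (PySem.Chars.rfind cs ['/'] = -1 ↔ (spl cs).tail = []) ∧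
    (spl cs).dropLast.flatMap (· ++ ['/']) =
      cs.take (PySem.Chars.rfind cs ['/'] + 1).toNat := by
  induction cs with
  | nil => refine ⟨by simp [rfind_nil, spl], by simp [rfind_nil, spl]⟩
  | cons c rest ih =>
    obtain ⟨ih1, ih2⟩ := ih
    rw [rfind_cons, spl_cons]
    by_cases h : PySem.Chars.rfind rest ['/'] = -1
    · have htail : (spl rest).tail = [] := ih1.mp h
      obtain ⟨p, hs⟩ : ∃ p, spl rest = [p] := by
        cases hsp : spl rest with
        | nil => exact absurd hsp (spl_ne_nil rest)
        | cons q qs => exact ⟨q, by simpa [hsp] using (by rw [hsp] at htail; simpa using htail : qs = [])⟩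
      rw [if_pos h, hs]
      by_cases hc : c = '/'
      · simp [hc]
      · simp [hc]
    · have htail : (spl rest).tail ≠ [] := fun ht => h (ih1.mpr ht)
      obtain ⟨p, ps, hps, hs⟩ : ∃ p ps, ps ≠ [] ∧ spl rest = p :: ps := by
        cases hsp : spl rest with
        | nil => exact absurd hsp (spl_ne_nil rest)
        | cons q qs => exact ⟨q, qs, by rw [hsp] at htail; simpa using htail, rfl⟩
      have hge : 0 ≤ PySem.Chars.rfind rest ['/'] := by
        have := rfind_ge rest; omega
      rw [if_neg h, hs]
      rw [hs] at ih2
      have hiff : ¬ (PySem.Chars.rfind rest ['/'] + 1 = -1) := by omega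
      have htn : (PySem.Chars.rfind rest ['/'] + 1 + 1).toNat
          = (PySem.Chars.rfind rest ['/'] + 1).toNat + 1 := by omega
      by_cases hc : c = '/'
      · refine ⟨by simp [hc, hiff], ?_⟩
        simp only [if_pos hc, List.dropLast_cons_of_ne_nil (by simp : (p :: ps) ≠ []),
          List.flatMap_cons, htn, List.take_succ_cons]
        simp [ih2, hc]
      · refine ⟨by simp [hc, hps, hiff], ?_⟩
        simp only [if_neg hc, List.headI_cons, List.tail_cons,
          List.dropLast_cons_of_ne_nil hps, List.flatMap_cons, htn, List.take_succ_cons]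
        rw [List.dropLast_cons_of_ne_nil hps, List.flatMap_cons] at ih2
        simp [← ih2]

-- ===== VERDICT (by name: the statement is the Claim_ definition above) =====
theorem original_photo_size_spec : Claim_equal_original_photo_size := by
  intro link _
  unfold Spec_original_photo_size original_photo_size original_photo_size_alt
  by_cases hl : link = "https://avatars.mds.yandex.net/get-yapic/0/0-0/islands-retina-50"
  · simp [hl]
  · rw [if_pos hl, if_neg (by simpa using hl)]
    dsimp only
    congr 1
    rw [PySem.Chars.slice_eq_listSlice,
      PySem.List.slice_to _ (by have := rfind_ge link.toList; omega)]
    rw [show (fun (acc e : List Char) => acc ++ e ++ ['/']) = fun acc e => acc ++ (e ++ ['/'])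
      from by funext acc e; simp]
    rw [PySem.List.foldl_append_eq_flatMap (· ++ ['/'])]
    rw [splitOn_eq_spl, replace_self]
    rw [List.flatMap_append, (key link.toList).2]
    simp
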